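-- pv_equiv track=rewrite | github.com/archeonsol/underspire | world/levels.py | get_grade
-- ===== SOURCE A (Python) =====
-- def get_grade(level, threshold_dict):
--     """
--     Universal grade lookup: iterate threshold dict from highest to lowest, return letter when level >= threshold.
--     threshold_dict: letter -> minimum level (e.g. {"A": 141, "B": 132, ..., "U": 1}).
--     """
--     if level is None or level < 0:
--         return "U"
--     level = int(level)
--     for letter, thresh in sorted(threshold_dict.items(), key=lambda x: -x[1]):
--         if level >= thresh:
--             return letter
--     return "U"
-- ===== SOURCE B (Python) =====
-- def get_grade(level, threshold_dict):
--     if level is None or level < 0: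
--         return "U"
--     level = int(level)
--     best = None
--     for letter, thresh in threshold_dict.items():
--         if thresh <= level and (best is None or thresh > best[1]):
--             best = (letter, thresh)
--     return best[0] if best is not None else "U"
-- ===== Notes on version B (the rewrite author's own statement) =====
-- stated objective: simpler
-- what changed: Replaced sort-descending-then-first-match with a single linear running-best scan over the dict items (strict > keeps the first entry on ties, matching the stable sort).
import Mathlib
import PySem

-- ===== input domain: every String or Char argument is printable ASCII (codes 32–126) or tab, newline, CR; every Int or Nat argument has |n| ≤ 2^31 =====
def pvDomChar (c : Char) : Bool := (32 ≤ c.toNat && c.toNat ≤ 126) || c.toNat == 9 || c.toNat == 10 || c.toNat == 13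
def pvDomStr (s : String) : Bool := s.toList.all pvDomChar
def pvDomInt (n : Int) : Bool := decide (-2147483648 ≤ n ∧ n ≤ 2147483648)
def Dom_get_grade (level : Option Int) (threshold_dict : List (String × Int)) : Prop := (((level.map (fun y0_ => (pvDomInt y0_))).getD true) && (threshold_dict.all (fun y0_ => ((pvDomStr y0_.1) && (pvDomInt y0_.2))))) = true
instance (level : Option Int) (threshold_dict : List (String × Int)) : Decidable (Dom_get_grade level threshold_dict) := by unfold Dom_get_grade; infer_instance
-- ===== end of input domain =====

-- B replaces A's sort-descending-then-first-match by a single linear running-best scan (simpler, one pass).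


-- ===== PORT A =====
-- the 'for … return letter … return "U"' loop, as structural recursion over the sorted items
def getGradeLoopA (lv : Int) : List (String × Int) → String
  | [] => "U"
  | (letter, thresh) :: rest => if lv ≥ thresh then letter else getGradeLoopA lv rest

def get_grade (level : Option Int) (threshold_dict : List (String × Int)) : String :=
  match level with
  | none => "U"
  | some lv =>
    if lv < 0 then "U"
    else getGradeLoopA lv (PySem.List.sorted threshold_dict (fun x => -x.2))

-- ===== PORT B =====
def get_grade_alt (level : Option Int) (threshold_dict : List (String × Int)) : String :=
  match level with
  | none => "U"
  | some lv =>
    if lv < 0 then "U"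
    else
      let best := threshold_dict.foldl
        (fun best p =>
          if decide (p.2 ≤ lv) && best.elim true (fun b => decide (p.2 > b.2)) then some p else best)
        (none : Option (String × Int))
      match best with
      | some b => b.1
      | none => "U"

-- ===== PRECONDITION & SPEC =====
def Spec_get_grade (level : Option Int) (threshold_dict : List (String × Int)) (out : String) : Prop := out = get_grade_alt level threshold_dict
instance (level : Option Int) (threshold_dict : List (String × Int)) (out : String) : Decidable (Spec_get_grade level threshold_dict out) := by unfold Spec_get_grade; infer_instance

-- ===== CLAIM (what is proved, stated in full; the proofs are below) =====
def Claim_equal_get_grade : Prop := ∀ (level : Option Int) (threshold_dict : List (String × Int)), Dom_get_grade level threshold_dict → Spec_get_grade level threshold_dict (get_grade level threshold_dict)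

-- ===== LEMMAS AND PROOFS =====

-- first qualifying element of a list, carried as an Option so its threshold is visible
def pvFirstGe (lv : Int) : List (String × Int) → Option (String × Int)
  | [] => none
  | p :: rest => if lv ≥ p.2 then some p else pvFirstGe lv rest

-- B's fold step, named for the lemmas
def pvStep (lv : Int) (best : Option (String × Int)) (p : String × Int) : Option (String × Int) :=
  if decide (p.2 ≤ lv) && best.elim true (fun b => decide (p.2 > b.2)) then some p else best

lemma pvLoopA_eq_firstGe (lv : Int) (l : List (String × Int)) :
    getGradeLoopA lv l = (match pvFirstGe lv l with | some b => b.1 | none => "U") := by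
  induction l with
  | nil => rfl
  | cons p rest ih =>
    obtain ⟨a, b⟩ := p
    simp only [getGradeLoopA, pvFirstGe]
    split_ifs with h <;> simp [ih]

lemma pvFirstGe_mem (lv : Int) (l : List (String × Int)) (b : String × Int)
    (h : pvFirstGe lv l = some b) : b ∈ l ∧ b.2 ≤ lv := by
  induction l with
  | nil => simp [pvFirstGe] at h
  | cons p rest ih =>
    simp only [pvFirstGe] at h
    split_ifs at h with hp
    · cases h; exact ⟨List.mem_cons_self, hp⟩
    · rcases ih h with ⟨h1, h2⟩; exact ⟨List.mem_cons_of_mem _ h1, h2⟩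

-- descending (by threshold) lists are preserved by the insertion step of the stable sort
lemma pvInsertBy_pairwise (x : String × Int) (l : List (String × Int))
    (hd : l.Pairwise (fun a b => b.2 ≤ a.2)) :
    (PySem.List.insertBy (fun a b => decide ((fun y : String × Int => -y.2) a < (fun y : String × Int => -y.2) b)) x l).Pairwise
      (fun a b => b.2 ≤ a.2) := by
  induction l with
  | nil => simp [PySem.List.insertBy]
  | cons y t ih =>
    rcases List.pairwise_cons.mp hd with ⟨hy, ht⟩
    simp only [PySem.List.insertBy]
    split_ifs with h
    · simp only [decide_eq_true_eq] at h
      refine List.pairwise_cons.mpr ⟨?_, hd⟩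
      intro z hz
      rcases List.mem_cons.mp hz with rfl | hz
      · omega
      · have := hy z hz; omega
    · simp only [decide_eq_true_eq] at h
      refine List.pairwise_cons.mpr ⟨?_, ih ht⟩
      intro z hz
      rcases (PySem.List.mem_insertBy _ _ _ _).mp hz with rfl | hz
      · omega
      · exact hy z hz

-- key step: first qualifying element after inserting x into a descending list = B's step
lemma pvFirstGe_insertBy (lv : Int) (x : String × Int) (l : List (String × Int))
    (hd : l.Pairwise (fun a b => b.2 ≤ a.2)) :
    pvFirstGe lv (PySem.List.insertBy (fun a b => decide ((fun y : String × Int => -y.2) a < (fun y : String × Int => -y.2) b)) x l)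
      = pvStep lv (pvFirstGe lv l) x := by
  induction l with
  | nil =>
    by_cases hx : x.2 ≤ lv <;>
      simp [PySem.List.insertBy, pvFirstGe, pvStep, ge_iff_le, hx]
  | cons y t ih =>
    rcases List.pairwise_cons.mp hd with ⟨hy, ht⟩
    simp only [PySem.List.insertBy]
    by_cases h : y.2 < x.2
    · rw [if_pos (by simp only [decide_eq_true_eq]; omega)]
      by_cases hx : x.2 ≤ lv
      · have hL : pvFirstGe lv (x :: y :: t) = some x := by
          simp [pvFirstGe, ge_iff_le, hx]
        rw [hL]
        rcases hb : pvFirstGe lv (y :: t) with _ | b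
        · simp [pvStep, hx]
        · rcases pvFirstGe_mem lv (y :: t) b hb with ⟨hmem, _⟩
          have hb2 : b.2 ≤ y.2 := by
            rcases List.mem_cons.mp hmem with rfl | hmem
            · exact le_refl _
            · exact hy b hmem
          have hlt : b.2 < x.2 := by omega
          simp [pvStep, hx, hlt]
      · have hL : pvFirstGe lv (x :: y :: t) = pvFirstGe lv (y :: t) := by
          simp [pvFirstGe, ge_iff_le, hx]
        rw [hL]
        simp [pvStep, hx]
    · rw [if_neg (by simp only [decide_eq_true_eq]; omega)]
      by_cases hyl : y.2 ≤ lv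
      · have hR : pvFirstGe lv (y :: t) = some y := by
          simp [pvFirstGe, ge_iff_le, hyl]
        have hL : pvFirstGe lv (y :: PySem.List.insertBy (fun a b => decide ((fun y : String × Int => -y.2) a < (fun y : String × Int => -y.2) b)) x t) = some y := by
          simp [pvFirstGe, ge_iff_le, hyl]
        rw [hL, hR]
        have hngt : ¬ x.2 > y.2 := h
        simp [pvStep, hngt]
      · have hR : pvFirstGe lv (y :: t) = pvFirstGe lv t := by
          simp [pvFirstGe, ge_iff_le, hyl]
        have hL : pvFirstGe lv (y :: PySem.List.insertBy (fun a b => decide ((fun y : String × Int => -y.2) a < (fun y : String × Int => -y.2) b)) x t) = pvFirstGe lv (PySem.List.insertBy (fun a b => decide ((fun y : String × Int => -y.2) a < (fun y : String × Int => -y.2) b)) x t) := by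
          simp [pvFirstGe, ge_iff_le, hyl]
        rw [hL, hR, ih ht]

lemma pvFoldl_sorted (lv : Int) (xs : List (String × Int)) :
    ∀ (acc : List (String × Int)), acc.Pairwise (fun a b => b.2 ≤ a.2) →
      pvFirstGe lv (xs.foldl (fun acc x => PySem.List.insertBy (fun a b => decide ((fun y : String × Int => -y.2) a < (fun y : String × Int => -y.2) b)) x acc) acc)
        = xs.foldl (pvStep lv) (pvFirstGe lv acc) := by
  induction xs with
  | nil => intro acc _; rfl
  | cons x rest ih =>
    intro acc hd
    simp only [List.foldl_cons]
    rw [ih _ (pvInsertBy_pairwise x acc hd), pvFirstGe_insertBy lv x acc hd]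

-- ===== VERDICT (by name: the statement is the Claim_ definition above) =====
theorem get_grade_spec : Claim_equal_get_grade := by
  intro level threshold_dict _
  unfold Spec_get_grade get_grade get_grade_alt
  match level with
  | none => rfl
  | some lv =>
    by_cases hneg : lv < 0
    · simp [hneg]
    · simp only [if_neg hneg]
      rw [PySem.List.sorted_eq_foldl_insertBy, pvLoopA_eq_firstGe,
          pvFoldl_sorted lv threshold_dict [] List.Pairwise.nil]
      have : (pvFirstGe lv []) = none := rfl
      rw [this]
      have hstep : (fun (best : Option (String × Int)) (p : String × Int) =>
          if decide (p.2 ≤ lv) && best.elim true (fun b => decide (p.2 > b.2)) then some p else best)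
          = pvStep lv := by
        funext best p; rfl
      rw [hstep]
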